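-- pv_equiv track=rewrite | github.com/siimveske/AOC | 2024/day2/day_02_red_nosed_reports.py | get_safe_reports
-- ===== SOURCE A (Python) =====
-- def get_safe_reports(reports: list[list[int]]) -> list[list[int]]:
--     safe_reports = []
--
--     min_diff = 1
--     max_diff = 3
--     for line in reports:
--         is_increasing_requence = line[0] < line[1]
--         is_safe = True
--         for i in range(len(line) - 1):
--             diff = line[i] - line[i+1]
--             if not min_diff <= abs(diff) <= max_diff:
--                 is_safe = False
--                 break
--             if is_increasing_requence and (line[i] - line[i+1]) >= 0:
--                 is_safe = False
--                 break
--             if not is_increasing_requence and (line[i] - line[i+1]) <= 0: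
--                 is_safe = False
--                 break
--         if is_safe:
--             safe_reports.append(line)
--
--     return safe_reports
-- ===== SOURCE B (Python) =====
-- def get_safe_reports(reports: list[list[int]]) -> list[list[int]]:
--     return [line for line in reports
--             if (line == sorted(line) or line == sorted(line, reverse=True))
--             and all(1 <= abs(b - a) <= 3 for a, b in zip(line, line[1:]))]
-- ===== Notes on version B (the rewrite author's own statement) =====
-- stated objective: alternative
-- what changed: Drops A's first-pair direction flag and incremental sign-checking loop with break entirely: B judges monotonicity globally by comparing the line against its sorted (and reverse-sorted) copy, and separately checks every adjacent gap magnitude in [1,3]; no direction variable exists.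
import Mathlib
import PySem

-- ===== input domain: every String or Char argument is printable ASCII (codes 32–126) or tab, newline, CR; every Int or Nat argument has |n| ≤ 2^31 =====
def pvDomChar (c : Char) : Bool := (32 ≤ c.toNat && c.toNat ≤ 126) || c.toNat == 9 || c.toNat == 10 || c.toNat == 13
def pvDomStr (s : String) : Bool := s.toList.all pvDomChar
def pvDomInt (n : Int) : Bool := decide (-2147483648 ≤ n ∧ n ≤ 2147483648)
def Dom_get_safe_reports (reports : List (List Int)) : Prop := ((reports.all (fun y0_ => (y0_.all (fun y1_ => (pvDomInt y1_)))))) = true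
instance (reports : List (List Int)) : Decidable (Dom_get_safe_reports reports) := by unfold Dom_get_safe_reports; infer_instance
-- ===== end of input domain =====

-- B drops A's first-pair direction flag and incremental break loop: it tests monotonicity globally
-- by comparing the line against its sorted / reverse-sorted copy, and checks all gap magnitudes in [1,3].
-- ===== PORT A =====
-- inner 'for i in range(len(line)-1)' loop with its three break branches
def pvALoop (line : List Int) (inc : Bool) : List Nat → Bool
  | [] => true
  | i :: rest =>
    let diff := line.getD i 0 - line.getD (i+1) 0
    if ¬(1 ≤ diff.natAbs ∧ diff.natAbs ≤ 3) then false
    else if inc = true ∧ 0 ≤ diff then false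
    else if inc = false ∧ diff ≤ 0 then false
    else pvALoop line inc rest

def get_safe_reports (reports : List (List Int)) : List (List Int) :=
  reports.foldl (fun safe_reports line =>
    let inc := decide (line.getD 0 0 < line.getD 1 0)
    if pvALoop line inc (List.range (line.length - 1)) then safe_reports ++ [line]
    else safe_reports) []

-- ===== PORT B =====
def pvBSafe (line : List Int) : Bool :=
  ((line == PySem.List.sorted line (fun x => x) false)
    || (line == PySem.List.sorted line (fun x => x) true))
  && (line.zip line.tail).all (fun p => decide (1 ≤ (p.2 - p.1).natAbs ∧ (p.2 - p.1).natAbs ≤ 3))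

def get_safe_reports_alt (reports : List (List Int)) : List (List Int) :=
  reports.filter pvBSafe

-- ===== PRECONDITION & SPEC =====
-- Pre_ excludes inputs containing a report of fewer than 2 values: there the Python A raises
-- IndexError at line[1] (B returns instead, keeping such trivially monotonic reports).
def Pre_get_safe_reports (reports : List (List Int)) : Prop :=
  ∀ line ∈ reports, 2 ≤ line.length
instance (reports : List (List Int)) : Decidable (Pre_get_safe_reports reports) := by
  unfold Pre_get_safe_reports; infer_instance
def pvWitness_get_safe_reports : List (List Int) := [[1, 2, 3], [5, 1]]

def Spec_get_safe_reports (reports : List (List Int)) (out : List (List Int)) : Prop := out = get_safe_reports_alt reports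
instance (reports : List (List Int)) (out : List (List Int)) : Decidable (Spec_get_safe_reports reports out) := by unfold Spec_get_safe_reports; infer_instance

-- ===== CLAIM =====
def Claim_equal_get_safe_reports : Prop := ∀ (reports : List (List Int)), Dom_get_safe_reports reports → Pre_get_safe_reports reports → Spec_get_safe_reports reports (get_safe_reports reports)

-- ===== LEMMAS AND PROOFS =====

-- pvALoop with its breaks is the 'all' of the per-index condition
theorem pvALoop_eq_all (line : List Int) (inc : Bool) (l : List Nat) :
    pvALoop line inc l = l.all (fun i =>
      let diff := line.getD i 0 - line.getD (i+1) 0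
      decide ((1 ≤ diff.natAbs ∧ diff.natAbs ≤ 3) ∧
        ¬(inc = true ∧ 0 ≤ diff) ∧ ¬(inc = false ∧ diff ≤ 0))) := by
  induction l with
  | nil => rfl
  | cons i rest ih =>
    simp only [pvALoop, List.all_cons, ih]
    split_ifs with h1 h2 h3 <;> simp_all

-- the zipped consecutive pairs, indexed
theorem zip_tail_eq (line : List Int) :
    line.zip line.tail = (List.range (line.length - 1)).map
      (fun j => (line.getD j 0, line.getD (j+1) 0)) := by
  apply List.ext_getElem
  · simp only [List.length_zip, List.length_tail, List.length_map, List.length_range]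
    omega
  · intro j h1 h2
    have hj : j < line.length - 1 := by simpa using h2
    simp only [List.getElem_zip, List.getElem_map, List.getElem_range,
      List.getElem_tail, List.getD_eq_getElem _ _ (by omega : j < line.length),
      List.getD_eq_getElem _ _ (by omega : j + 1 < line.length)]

-- a chain condition over consecutive elements, in getD-indexed form
theorem isChain_iff_getD (R : Int → Int → Prop) (line : List Int) :
    List.IsChain R line ↔ ∀ j < line.length - 1, R (line.getD j 0) (line.getD (j+1) 0) := by
  rw [List.isChain_iff_getElem]
  constructor
  · intro h j hj
    rw [List.getD_eq_getElem _ _ (by omega : j < line.length),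
        List.getD_eq_getElem _ _ (by omega : j + 1 < line.length)]
    exact h j (by omega)
  · intro h i hi
    have := h i (by omega)
    rwa [List.getD_eq_getElem _ _ (by omega : i < line.length),
        List.getD_eq_getElem _ _ (by omega : i + 1 < line.length)] at this

-- 'line == sorted(line)' means every consecutive pair is ≤
theorem eq_sorted_iff_chain (line : List Int) :
    line = PySem.List.sorted line (fun x => x) false ↔
      ∀ j < line.length - 1, line.getD j 0 ≤ line.getD (j+1) 0 := by
  rw [← isChain_iff_getD]
  constructor
  · intro h
    exact List.isChain_iff_pairwise.mpr (by rw [h]; exact PySem.List.sorted_pairwise line (fun x => x))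
  · intro h
    have hp : List.Pairwise (fun a b : Int => a ≤ b) line := List.isChain_iff_pairwise.mp h
    exact (PySem.List.sorted_eq_self_of_pairwise line (fun x => x) hp).symm

-- 'line == sorted(line, reverse=True)' means every consecutive pair is ≥
theorem eq_sorted_rev_iff_chain (line : List Int) :
    line = PySem.List.sorted line (fun x => x) true ↔
      ∀ j < line.length - 1, line.getD (j+1) 0 ≤ line.getD j 0 := by
  rw [← isChain_iff_getD (fun a b => b ≤ a)]
  haveI tr : Trans (fun (a b : Int) => b ≤ a) (fun a b => b ≤ a) (fun a b => b ≤ a) :=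
    ⟨fun h1 h2 => le_trans h2 h1⟩
  constructor
  · intro h
    exact List.isChain_iff_pairwise.mpr
      (by rw [h]; exact PySem.List.sorted_pairwise_rev line (fun x => x))
  · intro h
    have hp : List.Pairwise (fun a b : Int => b ≤ a) line := List.isChain_iff_pairwise.mp h
    exact (PySem.List.sorted_rev_eq_self_of_pairwise line (fun x => x) hp).symm

-- per-line agreement of the two safety tests
theorem safe_line_eq (line : List Int) :
    pvALoop line (decide (line.getD 0 0 < line.getD 1 0)) (List.range (line.length - 1)) =
    pvBSafe line := by
  rw [pvALoop_eq_all, Bool.eq_iff_iff]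
  unfold pvBSafe
  rw [zip_tail_eq, List.all_map]
  simp only [List.all_eq_true, List.mem_range, Bool.and_eq_true, Bool.or_eq_true, beq_iff_eq,
    decide_eq_true_eq, Function.comp]
  rw [eq_sorted_iff_chain, eq_sorted_rev_iff_chain]
  by_cases hc : line.getD 0 0 < line.getD 1 0
  · simp only [decide_eq_true hc, Bool.true_eq_false, false_and, not_false_iff, and_true]
    constructor
    · intro h
      refine ⟨Or.inl fun j hj => ?_, fun j hj => ?_⟩ <;> have := h j hj <;> omega
    · rintro ⟨hmono, hmag⟩ j hj
      have hm := hmag j hj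
      rcases hmono with hasc | hdesc
      · have hd := hasc j hj
        omega
      · have hd0 := hdesc 0 (by omega)
        have h0 := hmag 0 (by omega)
        simp only [show (0:Nat)+1 = 1 from rfl] at hd0 h0
        omega
  · have hcf : (line.getD 0 0 < line.getD 1 0) = False := eq_false hc
    simp only [hcf, decide_false, false_and, not_false_iff, true_and]
    rw [not_lt] at hc
    constructor
    · intro h
      refine ⟨Or.inr fun j hj => ?_, fun j hj => ?_⟩ <;> have := h j hj <;> omega
    · rintro ⟨hmono, hmag⟩ j hj
      have hm := hmag j hj
      rcases hmono with hasc | hdesc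
      · have hd0 := hasc 0 (by omega)
        have h0 := hmag 0 (by omega)
        simp only [show (0:Nat)+1 = 1 from rfl] at hd0 h0
        omega
      · have hd := hdesc j hj
        omega

theorem foldl_eq_filter (reports acc : List (List Int)) :
    reports.foldl (fun safe_reports line =>
      let inc := decide (line.getD 0 0 < line.getD 1 0)
      if pvALoop line inc (List.range (line.length - 1)) then safe_reports ++ [line]
      else safe_reports) acc = acc ++ reports.filter pvBSafe := by
  induction reports generalizing acc with
  | nil => simp
  | cons line rest ih =>
    simp only [List.foldl_cons, List.filter_cons]
    rw [safe_line_eq line]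
    by_cases hc : pvBSafe line = true <;>
      simp only [hc, if_true, if_false, Bool.false_eq_true] <;> rw [ih] <;> simp

-- ===== VERDICT =====
theorem get_safe_reports_spec : Claim_equal_get_safe_reports := by
  intro reports _ _
  unfold Spec_get_safe_reports get_safe_reports get_safe_reports_alt
  exact foldl_eq_filter reports []
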